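-- pv_equiv track=rewrite | github.com/luxiopppp/Guias-Algo-I | simulacros python/Simulacro2.py | pos_umbral
-- ===== SOURCE A (Python) =====
-- def pos_umbral(s: list [int], u: int) -> int:
--   lista: list = s.copy()
--   sum: int = 0
--   res: int = -1
--
--   for i in range(len(lista)):
--     sum = sum + lista[i]
--     if sum > u and sum - lista[i] < u:
--       res = i
--
--   return res
-- ===== SOURCE B (Python) =====
-- def pos_umbral(s: list, u: int) -> int:
--     # Backward scan: start from the total sum and walk right-to-left,
--     # returning the first (i.e. last) index where the prefix sum crosses u.
--     running = sum(s)
--     for i in range(len(s) - 1, -1, -1):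
--         if running > u and running - s[i] < u:
--             return i
--         running -= s[i]
--     return -1
-- ===== Notes on version B (the rewrite author's own statement) =====
-- stated objective: alternative
-- what changed: B computes the total once and scans right-to-left with an early return at the last crossing index, instead of A's full left-to-right pass that keeps overwriting the result.
import Mathlib
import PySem

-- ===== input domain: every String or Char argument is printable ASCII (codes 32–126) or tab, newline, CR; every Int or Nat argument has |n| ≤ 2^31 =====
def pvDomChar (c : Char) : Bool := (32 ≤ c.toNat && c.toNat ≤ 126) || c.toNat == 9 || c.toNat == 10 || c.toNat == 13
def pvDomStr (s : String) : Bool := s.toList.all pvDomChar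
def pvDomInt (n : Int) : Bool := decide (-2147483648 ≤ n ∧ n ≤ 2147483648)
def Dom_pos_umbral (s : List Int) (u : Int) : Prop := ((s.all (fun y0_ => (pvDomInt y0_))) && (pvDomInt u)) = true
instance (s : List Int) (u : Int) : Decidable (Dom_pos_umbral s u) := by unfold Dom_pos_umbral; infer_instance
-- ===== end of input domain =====

-- B replaces A's full left-to-right scan (which overwrites its result) by a
-- right-to-left scan from the total sum with an early return (objective: alternative).

-- ===== PORT A =====
def pos_umbral (s : List Int) (u : Int) : Int :=
  let lista := s  -- s.copy()
  let st := (PySem.List.pyRange 0 lista.length 1).foldl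
    (fun (st : Int × Int) i =>
      let sum := st.1 + PySem.List.pyGetD lista i 0
      let res := if sum > u ∧ sum - PySem.List.pyGetD lista i 0 < u then i else st.2
      (sum, res)) (0, -1)
  st.2

-- ===== PORT B =====
-- the for-loop of Source B over range(len(s)-1, -1, -1) with early return, as index recursion
def pos_umbral_altAux (s : List Int) (u : Int) : Nat → Int → Int
  | 0, _ => -1
  | i + 1, running =>
    let x := PySem.List.pyGetD s (i : Int) 0
    if running > u ∧ running - x < u then (i : Int)
    else pos_umbral_altAux s u i (running - x)

def pos_umbral_alt (s : List Int) (u : Int) : Int :=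
  pos_umbral_altAux s u s.length s.sum

-- ===== PRECONDITION & SPEC =====
def Spec_pos_umbral (s : List Int) (u : Int) (out : Int) : Prop := out = pos_umbral_alt s u
instance (s : List Int) (u : Int) (out : Int) : Decidable (Spec_pos_umbral s u out) := by unfold Spec_pos_umbral; infer_instance

-- ===== CLAIM (what is proved, stated in full; the proofs are below) =====
def Claim_equal_pos_umbral : Prop := ∀ (s : List Int) (u : Int), Dom_pos_umbral s u → Spec_pos_umbral s u (pos_umbral s u)

-- ===== LEMMAS AND PROOFS =====

-- the forward fold of port A, cut off at the first n indices
def pvFoldA (s : List Int) (u : Int) (n : Nat) : Int × Int :=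
  (PySem.List.pyRange 0 (n : Int) 1).foldl
    (fun (st : Int × Int) i =>
      let sum := st.1 + PySem.List.pyGetD s i 0
      let res := if sum > u ∧ sum - PySem.List.pyGetD s i 0 < u then i else st.2
      (sum, res)) (0, -1)

-- invariant: after n steps the forward sum is the prefix sum, and the backward
-- scan started at that prefix sum with fuel n returns exactly the forward result
theorem pvFoldA_inv (s : List Int) (u : Int) :
    ∀ n : Nat, n ≤ s.length →
      (pvFoldA s u n).1 = (s.take n).sum ∧
      pos_umbral_altAux s u n (s.take n).sum = (pvFoldA s u n).2 := by
  intro n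
  induction n with
  | zero =>
    intro _
    simp [pvFoldA, PySem.List.pyRange_one_eq_nil, pos_umbral_altAux]
  | succ m ih =>
    intro h
    have hm : m ≤ s.length := Nat.le_of_succ_le h
    have hmlt : m < s.length := h
    obtain ⟨hsum, hres⟩ := ih hm
    have hsplit : PySem.List.pyRange 0 ((m + 1 : Nat) : Int) 1 =
        PySem.List.pyRange 0 (m : Int) 1 ++ [(m : Int)] := by
      push_cast
      exact PySem.List.pyRange_one_succ_right (by positivity)
    have hfold : pvFoldA s u (m + 1) =
        (let sum := (pvFoldA s u m).1 + PySem.List.pyGetD s (m : Int) 0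
         let res := if sum > u ∧ sum - PySem.List.pyGetD s (m : Int) 0 < u
                    then (m : Int) else (pvFoldA s u m).2
         (sum, res)) := by
      simp only [pvFoldA, hsplit, List.foldl_append, List.foldl_cons, List.foldl_nil]
    have hx : PySem.List.pyGetD s (m : Int) 0 = s[m] :=
      PySem.List.pyGetD_ofNat s m 0 hmlt
    have htake : (s.take (m + 1)).sum = (s.take m).sum + s[m] := by
      exact List.sum_take_succ s m hmlt
    constructor
    · rw [hfold]
      simp only [hx, htake, hsum]
    · rw [hfold]
      simp only [hx]
      rw [htake]
      show pos_umbral_altAux s u (m + 1) ((s.take m).sum + s[m]) = _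
      rw [pos_umbral_altAux]
      simp only [hx]
      by_cases hc : (s.take m).sum + s[m] > u ∧ (s.take m).sum + s[m] - s[m] < u
      · rw [if_pos hc]
        have : (s.take m).sum + s[m] > u ∧ (s.take m).sum + s[m] - s[m] < u := hc
        rw [if_pos (by rw [hsum]; exact hc)]
      · rw [if_neg hc, if_neg (by rw [hsum]; exact hc)]
        have : (s.take m).sum + s[m] - s[m] = (s.take m).sum := by ring
        rw [this, hres]

-- ===== VERDICT (by name: the statement is the Claim_ definition above) =====
theorem pos_umbral_spec : Claim_equal_pos_umbral := by
  intro s u _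
  unfold Spec_pos_umbral pos_umbral pos_umbral_alt
  obtain ⟨_, hres⟩ := pvFoldA_inv s u s.length (le_refl _)
  simp only [List.take_of_length_le (le_refl s.length)] at hres
  exact (hres).symm
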